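-- pv_equiv track=rewrite | github.com/samuelmahle/unreleased-jamz-v2 | src/midi_processor.py | _estimate_genre
-- ===== SOURCE A (Python) =====
-- from typing import Dict, List, Tuple, Optional
--
-- def _estimate_genre(instruments: List[str], harmony: Dict, rhythm: Dict) -> str:
--     """Estimate the musical genre based on instruments and musical characteristics."""
--     # Simple genre estimation based on instruments
--     if any('bass' in inst.lower() for inst in instruments):
--         if any('guitar' in inst.lower() for inst in instruments):
--             return 'rock'
--         elif any('synth' in inst.lower() for inst in instruments):
--             return 'electronic'
--     elif any('piano' in inst.lower() for inst in instruments):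
--         if any('violin' in inst.lower() for inst in instruments):
--             return 'classical'
--         else:
--             return 'jazz'
--
--     return 'electronic'  # default
-- ===== SOURCE B (Python) =====
-- def _estimate_genre(instruments, harmony, rhythm):
--     """Estimate the musical genre based on instruments and musical characteristics."""
--     # One pass: lowercase each name once and accumulate keyword flags.
--     bass = guitar = synth = piano = violin = False
--     for inst in instruments:
--         low = inst.lower()
--         bass = bass or 'bass' in low
--         guitar = guitar or 'guitar' in low
--         synth = synth or 'synth' in low
--         piano = piano or 'piano' in low
--         violin = violin or 'violin' in low
--     if bass:
--         if guitar:
--             return 'rock'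
--         if synth:
--             return 'electronic'
--     elif piano:
--         return 'classical' if violin else 'jazz'
--     return 'electronic'
-- ===== Notes on version B (the rewrite author's own statement) =====
-- stated objective: alternative
-- what changed: A makes up to five separate any()-scans over the instrument list, lowercasing each name in every scan; B makes a single pass that lowercases each name once and accumulates five keyword flags, then branches on the flags.
import Mathlib
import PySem

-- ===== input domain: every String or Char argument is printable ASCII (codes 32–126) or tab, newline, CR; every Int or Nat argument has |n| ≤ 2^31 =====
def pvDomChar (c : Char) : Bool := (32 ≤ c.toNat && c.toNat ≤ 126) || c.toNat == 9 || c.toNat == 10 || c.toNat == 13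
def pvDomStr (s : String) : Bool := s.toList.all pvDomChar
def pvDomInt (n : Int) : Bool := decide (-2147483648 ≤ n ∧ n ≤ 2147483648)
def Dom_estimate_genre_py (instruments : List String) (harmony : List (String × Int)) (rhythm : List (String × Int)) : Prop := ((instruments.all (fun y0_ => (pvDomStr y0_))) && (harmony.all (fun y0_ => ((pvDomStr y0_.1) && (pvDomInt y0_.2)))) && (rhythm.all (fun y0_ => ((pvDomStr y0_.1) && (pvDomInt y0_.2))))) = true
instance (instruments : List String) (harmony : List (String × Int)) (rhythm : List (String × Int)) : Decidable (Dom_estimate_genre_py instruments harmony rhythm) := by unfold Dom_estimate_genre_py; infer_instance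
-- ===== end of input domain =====

-- ===== PORT A =====
-- B (below) replaces A's five separate any-scans with a single flag-accumulating pass; same return value.
def estimate_genre_py (instruments : List String) (harmony : List (String × Int)) (rhythm : List (String × Int)) : String :=
  if instruments.any (fun inst => PySem.Str.isIn "bass" (PySem.Str.lower inst)) then
    if instruments.any (fun inst => PySem.Str.isIn "guitar" (PySem.Str.lower inst)) then
      "rock"
    else if instruments.any (fun inst => PySem.Str.isIn "synth" (PySem.Str.lower inst)) then
      "electronic"
    else
      "electronic"
  else if instruments.any (fun inst => PySem.Str.isIn "piano" (PySem.Str.lower inst)) then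
    if instruments.any (fun inst => PySem.Str.isIn "violin" (PySem.Str.lower inst)) then
      "classical"
    else
      "jazz"
  else
    "electronic"

-- ===== PORT B =====
-- the loop body of Source B: update the five flags from one instrument name (lowercased once)
def genreStep (fl : Bool × Bool × Bool × Bool × Bool) (inst : String) : Bool × Bool × Bool × Bool × Bool :=
  let low := PySem.Str.lower inst
  (fl.1 || PySem.Str.isIn "bass" low,
   fl.2.1 || PySem.Str.isIn "guitar" low,
   fl.2.2.1 || PySem.Str.isIn "synth" low,
   fl.2.2.2.1 || PySem.Str.isIn "piano" low,
   fl.2.2.2.2 || PySem.Str.isIn "violin" low)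

def estimate_genre_py_alt (instruments : List String) (harmony : List (String × Int)) (rhythm : List (String × Int)) : String :=
  let fl := instruments.foldl genreStep (false, false, false, false, false)
  if fl.1 then
    if fl.2.1 then "rock"
    else if fl.2.2.1 then "electronic"
    else "electronic"
  else if fl.2.2.2.1 then
    if fl.2.2.2.2 then "classical" else "jazz"
  else
    "electronic"

-- ===== PRECONDITION & SPEC =====
def Spec_estimate_genre_py (instruments : List String) (harmony : List (String × Int)) (rhythm : List (String × Int)) (out : String) : Prop := out = estimate_genre_py_alt instruments harmony rhythm
instance (instruments : List String) (harmony : List (String × Int)) (rhythm : List (String × Int)) (out : String) : Decidable (Spec_estimate_genre_py instruments harmony rhythm out) := by unfold Spec_estimate_genre_py; infer_instance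

-- ===== CLAIM (what is proved, stated in full; the proofs are below) =====
def Claim_equal_estimate_genre_py : Prop := ∀ (instruments : List String) (harmony : List (String × Int)) (rhythm : List (String × Int)), Dom_estimate_genre_py instruments harmony rhythm → Spec_estimate_genre_py instruments harmony rhythm (estimate_genre_py instruments harmony rhythm)

-- ===== LEMMAS AND PROOFS =====
-- the folded flags are exactly the five any-scans, seeded with the initial flags
theorem genre_foldl_flags (l : List String) (b g s p v : Bool) :
    l.foldl genreStep (b, g, s, p, v) =
      (b || l.any (fun i => PySem.Str.isIn "bass" (PySem.Str.lower i)),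
       g || l.any (fun i => PySem.Str.isIn "guitar" (PySem.Str.lower i)),
       s || l.any (fun i => PySem.Str.isIn "synth" (PySem.Str.lower i)),
       p || l.any (fun i => PySem.Str.isIn "piano" (PySem.Str.lower i)),
       v || l.any (fun i => PySem.Str.isIn "violin" (PySem.Str.lower i))) := by
  induction l generalizing b g s p v with
  | nil => simp
  | cons x xs ih =>
    simp only [List.foldl_cons, genreStep, List.any_cons]
    rw [ih]
    simp [Bool.or_assoc]

-- ===== VERDICT (by name: the statement is the Claim_ definition above) =====
theorem estimate_genre_py_spec : Claim_equal_estimate_genre_py := by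
  intro instruments harmony rhythm _
  unfold Spec_estimate_genre_py estimate_genre_py estimate_genre_py_alt
  rw [genre_foldl_flags]
  simp only [Bool.false_or]
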